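-- pv_equiv track=rewrite | github.com/amir-tagh/Automated-Docking | Scripts/extract_mol2_from_parent_mol2.py | extract_molecules
-- ===== SOURCE A (Python) =====
-- def extract_molecules(content, start, end):
--     molecules = content.split('@<TRIPOS>MOLECULE')
--
--     if start < 1:
--         start = 1
--     if end > len(molecules) - 1:
--         end = len(molecules) - 1
--
--     selected_molecules = molecules[start:end + 1]
--
--     # Add back the '@<TRIPOS>MOLECULE' identifier to each molecule
--     selected_molecules = ['@<TRIPOS>MOLECULE' + mol for mol in selected_molecules]
--     return ''.join(selected_molecules)
-- ===== SOURCE B (Python) =====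
-- def extract_molecules(content, start, end):
--     d = '@<TRIPOS>MOLECULE'
--     # collect the offsets of the delimiter occurrences
--     offsets = []
--     i = content.find(d)
--     while i != -1:
--         offsets.append(i)
--         i = content.find(d, i + len(d))
--     k = len(offsets)
--     start = max(start, 1)
--     end = min(end, k)
--     if start > end:
--         return ''
--     lo = offsets[start - 1]
--     hi = offsets[end] if end < k else len(content)
--     return content[lo:hi]
-- ===== Notes on version B (the rewrite author's own statement) =====
-- stated objective: alternative
-- what changed: Instead of splitting the content into a list of pieces, re-prepending the delimiter to each selected piece and joining them, B scans the content once with a find-loop to collect the delimiter offsets and returns one contiguous slice of the original content between the clamped start/end offsets.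
-- intended difference: When end <= -2 and the content holds enough delimiters that Python's negative slice stop wraps past the clamped start (max(start,1) < count+end+2), A returns a non-empty tail-truncated block of molecules due to accidental negative-index wraparound, while B returns '' as a request with end below start selects no molecules, which is the intended reading of the 1-based range. — e.g. on extract_molecules("@<TRIPOS>MOLECULEx@<TRIPOS>MOLECULEy", 1, -2): A returns "@<TRIPOS>MOLECULEx", B returns ""
import Mathlib
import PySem

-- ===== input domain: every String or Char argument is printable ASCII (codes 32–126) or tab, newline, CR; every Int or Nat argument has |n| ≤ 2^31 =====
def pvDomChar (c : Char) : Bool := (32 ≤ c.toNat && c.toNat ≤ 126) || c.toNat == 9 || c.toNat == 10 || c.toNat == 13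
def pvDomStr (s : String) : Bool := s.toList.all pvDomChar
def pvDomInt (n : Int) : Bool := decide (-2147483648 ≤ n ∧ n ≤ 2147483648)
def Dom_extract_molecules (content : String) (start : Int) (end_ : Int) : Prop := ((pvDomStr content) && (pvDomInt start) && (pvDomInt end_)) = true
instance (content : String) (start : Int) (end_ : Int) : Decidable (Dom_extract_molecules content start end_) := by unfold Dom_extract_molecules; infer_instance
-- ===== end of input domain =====

-- B replaces A's split/prepend/join pipeline by a find-loop over delimiter offsets and a single
-- substring slice of the original content (objective: alternative decomposition); on end_ ≤ -2
-- where A's negative slice stop wraps, B intentionally returns "" (see D_ below).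

-- the delimiter constant, shared by both ports
def emDelim : List Char := "@<TRIPOS>MOLECULE".toList

-- ===== PORT A =====
def extract_molecules (content : String) (start : Int) (end_ : Int) : String :=
  let molecules := PySem.Chars.splitOn content.toList emDelim
  let start1 := if start < 1 then 1 else start
  let end1 := if end_ > (molecules.length : Int) - 1 then (molecules.length : Int) - 1 else end_
  let selected := PySem.List.slice molecules (some start1) (some (end1 + 1))
  let selected2 := selected.map (fun mol => emDelim ++ mol)
  String.ofList (PySem.Chars.join [] selected2)

-- ===== PORT B =====
-- the while loop of Source B: collect successive find results; the fuel bounds the iterations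
def emOffsetsLoop (cs : List Char) : Nat → Int → List Int
  | 0, _ => []
  | fuel+1, i =>
    if i = -1 then []
    else i :: emOffsetsLoop cs fuel (PySem.Chars.findFrom cs emDelim (i + (emDelim.length : Int)))

def extract_molecules_alt (content : String) (start : Int) (end_ : Int) : String :=
  let cs := content.toList
  let offsets := emOffsetsLoop cs (cs.length + 1) (PySem.Chars.find cs emDelim)
  let k : Int := offsets.length
  let start1 := max start 1
  let end1 := min end_ k
  if start1 > end1 then ""
  else
    let lo := (PySem.List.pyGet? offsets (start1 - 1)).getD 0
    let hi := if end1 < k then (PySem.List.pyGet? offsets end1).getD 0 else (cs.length : Int)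
    String.ofList (PySem.Chars.slice cs (some lo) (some hi))

-- ===== PRECONDITION & SPEC =====
-- When end_ ≤ -2 and the content holds enough delimiters that Python's negative slice stop wraps
-- past the clamped start, A returns a non-empty tail-truncated block of molecules due to
-- accidental negative-index wraparound, while B returns "" as a request with end below start
-- selects no molecules, which is the intended reading of the 1-based range.
def D_extract_molecules (content : String) (start : Int) (end_ : Int) : Prop :=
  end_ ≤ -2 ∧ max start 1 < ((PySem.Chars.splitOn content.toList emDelim).length : Int) + end_ + 1
instance (content : String) (start : Int) (end_ : Int) : Decidable (D_extract_molecules content start end_) := by unfold D_extract_molecules; infer_instance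

def Spec_extract_molecules (content : String) (start : Int) (end_ : Int) (out : String) : Prop := ¬ D_extract_molecules content start end_ → out = extract_molecules_alt content start end_
instance (content : String) (start : Int) (end_ : Int) (out : String) : Decidable (Spec_extract_molecules content start end_ out) := by unfold Spec_extract_molecules; infer_instance

def pvDiffWitness_extract_molecules : String × Int × Int := ("@<TRIPOS>MOLECULEx@<TRIPOS>MOLECULEy", 1, -2)
def pvDiffWitnessOut_extract_molecules : String × String := ("@<TRIPOS>MOLECULEx", "")

-- ===== CLAIM (what is proved, stated in full; the proofs are below) =====
def Claim_unchanged_extract_molecules : Prop := ∀ (content : String) (start : Int) (end_ : Int), Dom_extract_molecules content start end_ → Spec_extract_molecules content start end_ (extract_molecules content start end_)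
def Claim_changed_extract_molecules : Prop := Dom_extract_molecules (pvDiffWitness_extract_molecules.1) (pvDiffWitness_extract_molecules.2.1) (pvDiffWitness_extract_molecules.2.2) ∧ D_extract_molecules (pvDiffWitness_extract_molecules.1) (pvDiffWitness_extract_molecules.2.1) (pvDiffWitness_extract_molecules.2.2) ∧ extract_molecules (pvDiffWitness_extract_molecules.1) (pvDiffWitness_extract_molecules.2.1) (pvDiffWitness_extract_molecules.2.2) = pvDiffWitnessOut_extract_molecules.1 ∧ extract_molecules_alt (pvDiffWitness_extract_molecules.1) (pvDiffWitness_extract_molecules.2.1) (pvDiffWitness_extract_molecules.2.2) = pvDiffWitnessOut_extract_molecules.2 ∧ pvDiffWitnessOut_extract_molecules.1 ≠ pvDiffWitnessOut_extract_molecules.2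
def Claim_exact_extract_molecules : Prop := ∀ (content : String) (start : Int) (end_ : Int), Dom_extract_molecules content start end_ → D_extract_molecules content start end_ → extract_molecules content start end_ ≠ extract_molecules_alt content start end_

-- ===== LEMMAS AND PROOFS =====

theorem em_join_nil_eq_flatten (L : List (List Char)) : PySem.Chars.join [] L = L.flatten := by
  induction L with
  | nil => simp [PySem.Chars.join_nil]
  | cons p rest ih =>
    cases rest with
    | nil => simp [PySem.Chars.join, List.intercalate]
    | cons q r =>
      rw [PySem.Chars.join_cons_cons]
      simpa using ih

theorem em_find_go_offset (sub : List Char) (l : List Char) (k : Nat) :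
    PySem.Chars.find.go sub l k =
      if PySem.Chars.find l sub = -1 then -1 else (k : Int) + PySem.Chars.find l sub := by
  induction l generalizing k with
  | nil =>
    simp only [PySem.Chars.find, PySem.Chars.find.go]
    split_ifs <;> simp_all <;> omega
  | cons c rest ih =>
    rw [PySem.Chars.find.go]
    conv_rhs => rw [PySem.Chars.find, PySem.Chars.find.go]
    by_cases hp : sub.isPrefixOf (c :: rest)
    · simp [hp]
    · rw [if_neg hp, if_neg hp, ih]
      rw [show PySem.Chars.find.go sub rest (0+1) = _ from ih 1]
      have h1 := PySem.Chars.neg_one_le_find rest sub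
      split_ifs <;> simp_all <;> omega

theorem em_find_cons (sub : List Char) (c : Char) (rest : List Char) :
    PySem.Chars.find (c :: rest) sub =
      if sub.isPrefixOf (c :: rest) then 0
      else if PySem.Chars.find rest sub = -1 then -1 else 1 + PySem.Chars.find rest sub := by
  rw [PySem.Chars.find, PySem.Chars.find.go]
  by_cases hp : sub.isPrefixOf (c :: rest)
  · simp [hp]
  · rw [if_neg hp, if_neg hp, show PySem.Chars.find.go sub rest (0+1) = _ from em_find_go_offset sub rest 1]
    split_ifs <;> push_cast <;> omega

theorem em_find_occ (sep l : List Char) (j : Int) (h : PySem.Chars.find l sep = j) (hj : 0 ≤ j) :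
    sep <+: l.drop j.toNat ∧ j.toNat + sep.length ≤ l.length := by
  have hs := PySem.Chars.find_spec (s := l) (sub := sep) (by omega)
  rw [h] at hs
  refine ⟨hs.1, ?_⟩
  have hlen := List.IsPrefix.length_le hs.1
  have hdl : (List.drop j.toNat l).length = l.length - j.toNat := List.length_drop ..
  have hjl : j ≤ (l.length : Int) := by rw [← h]; exact PySem.Chars.find_le_length l sep
  omega

theorem em_go_nil (sep : List Char) (fuel : Nat) (cur : List Char) (acc : List (List Char)) :
    PySem.Chars.splitOn.go sep (fuel+1) [] cur acc = (cur.reverse :: acc).reverse := by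
  rw [PySem.Chars.splitOn.go]
  omega

theorem em_go_cons (sep : List Char) (fuel : Nat) (c : Char) (rest : List Char)
    (cur : List Char) (acc : List (List Char)) :
    PySem.Chars.splitOn.go sep (fuel+1) (c :: rest) cur acc =
      if sep.isPrefixOf (c :: rest)
      then PySem.Chars.splitOn.go sep fuel (List.drop sep.length (c :: rest)) [] (cur.reverse :: acc)
      else PySem.Chars.splitOn.go sep fuel rest (c :: cur) acc := by
  rw [PySem.Chars.splitOn.go]

theorem em_go_fuel (sep : List Char) (hd : sep ≠ []) :
    ∀ f1 f2 l cur acc, l.length < f1 → l.length < f2 →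
      PySem.Chars.splitOn.go sep f1 l cur acc = PySem.Chars.splitOn.go sep f2 l cur acc := by
  intro f1
  induction f1 with
  | zero => intro f2 l cur acc h1; omega
  | succ f1 ih =>
    intro f2 l cur acc h1 h2
    cases f2 with
    | zero => omega
    | succ f2 =>
      cases l with
      | nil => rw [em_go_nil, em_go_nil]
      | cons c rest =>
        rw [em_go_cons, em_go_cons]
        by_cases hp : sep.isPrefixOf (c :: rest)
        · rw [if_pos hp, if_pos hp]
          apply ih
          · have : 1 ≤ sep.length := List.length_pos_of_ne_nil hd
            simp only [List.length_drop]
            simp at h1 ⊢; omega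
          · have : 1 ≤ sep.length := List.length_pos_of_ne_nil hd
            simp only [List.length_drop]
            simp at h2 ⊢; omega
        · rw [if_neg hp, if_neg hp]
          apply ih <;> simp at h1 h2 <;> omega

theorem em_go_inv (sep : List Char) (hd : sep ≠ []) :
    ∀ fuel l cur acc, l.length < fuel →
      PySem.Chars.splitOn.go sep fuel l cur acc
        = acc.reverse ++ (PySem.Chars.splitOn.go sep fuel l [] []).modifyHead (cur.reverse ++ ·) := by
  intro fuel
  induction fuel with
  | zero => intro l cur acc h; omega
  | succ fuel ih =>
    intro l cur acc h
    cases l with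
    | nil => rw [em_go_nil, em_go_nil]; simp
    | cons c rest =>
      rw [em_go_cons, em_go_cons]
      have hsep : 1 ≤ sep.length := List.length_pos_of_ne_nil hd
      by_cases hp : sep.isPrefixOf (c :: rest)
      · rw [if_pos hp, if_pos hp]
        have hlen : (List.drop sep.length (c :: rest)).length < fuel := by
          simp only [List.length_drop]; simp at h ⊢; omega
        simp only [List.reverse_nil]
        rw [ih _ [] (cur.reverse :: acc) hlen, ih _ [] ([[]] : List (List Char)) hlen]
        simp
      · rw [if_neg hp, if_neg hp]
        have hlen : rest.length < fuel := by simp at h; omega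
        rw [ih rest (c :: cur) acc hlen, ih rest [c] [] hlen]
        simp [List.modifyHead_modifyHead]
        cases (PySem.Chars.splitOn.go sep fuel rest [] []) with
        | nil => simp
        | cons p ps => simp

theorem em_splitOn_none (sep : List Char) (hd : sep ≠ []) :
    ∀ (l : List Char), PySem.Chars.find l sep = -1 → PySem.Chars.splitOn l sep = [l] := by
  intro l
  induction l with
  | nil => intro _; rfl
  | cons c rest ih =>
    intro h
    rw [em_find_cons] at h
    have hp : ¬ sep.isPrefixOf (c :: rest) := by
      intro hp; rw [if_pos hp] at h; omega
    rw [if_neg hp] at h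
    have hr : PySem.Chars.find rest sep = -1 := by
      by_cases hr : PySem.Chars.find rest sep = -1
      · exact hr
      · rw [if_neg hr] at h
        have := PySem.Chars.neg_one_le_find rest sep
        omega
    rw [PySem.Chars.splitOn]
    simp only [List.length_cons]
    rw [em_go_cons, if_neg hp, em_go_inv sep hd _ _ _ _ (by simp)]
    rw [show PySem.Chars.splitOn.go sep (rest.length + 1) rest [] [] = PySem.Chars.splitOn rest sep from rfl]
    rw [ih hr]
    simp

theorem em_splitOn_some (sep : List Char) (hd : sep ≠ []) :
    ∀ (l : List Char) (j : Int), PySem.Chars.find l sep = j → 0 ≤ j →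
    PySem.Chars.splitOn l sep
      = l.take j.toNat :: PySem.Chars.splitOn (l.drop (j.toNat + sep.length)) sep := by
  intro l
  induction l with
  | nil =>
    intro j h hj
    rw [PySem.Chars.find, PySem.Chars.find.go] at h
    have he : sep.isEmpty = false := by
      cases sep with
      | nil => exact absurd rfl hd
      | cons a t => rfl
    rw [he] at h
    simp at h; omega
  | cons c rest ih =>
    intro j h hj
    have hsep : 1 ≤ sep.length := List.length_pos_of_ne_nil hd
    rw [em_find_cons] at h
    by_cases hp : sep.isPrefixOf (c :: rest)
    · rw [if_pos hp] at h
      subst h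
      rw [PySem.Chars.splitOn]
      simp only [List.length_cons]
      rw [em_go_cons, if_pos hp]
      have hlen : (List.drop sep.length (c :: rest)).length < rest.length + 1 := by
        simp only [List.length_drop]; simp; omega
      rw [em_go_inv sep hd _ _ _ _ hlen]
      rw [em_go_fuel sep hd _ ((List.drop sep.length (c :: rest)).length + 1) _ [] [] hlen (by omega)]
      rw [show PySem.Chars.splitOn.go sep ((List.drop sep.length (c :: rest)).length + 1) (List.drop sep.length (c :: rest)) [] [] = PySem.Chars.splitOn (List.drop sep.length (c :: rest)) sep from rfl]
      simp [List.drop_drop]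
      cases PySem.Chars.splitOn (List.drop sep.length (c :: rest)) sep with
      | nil => simp
      | cons p ps => simp
    · rw [if_neg hp] at h
      have hr : ¬ PySem.Chars.find rest sep = -1 := by
        intro hr; rw [if_pos hr] at h; omega
      rw [if_neg hr] at h
      have hrge := PySem.Chars.neg_one_le_find rest sep
      have ihr := ih (PySem.Chars.find rest sep) rfl (by omega)
      rw [PySem.Chars.splitOn]
      simp only [List.length_cons]
      rw [em_go_cons, if_neg hp, em_go_inv sep hd _ _ _ _ (by simp)]
      rw [show PySem.Chars.splitOn.go sep (rest.length + 1) rest [] [] = PySem.Chars.splitOn rest sep from rfl]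
      rw [ihr]
      have hnat : j.toNat = (PySem.Chars.find rest sep).toNat + 1 := by omega
      rw [hnat]
      rw [show (PySem.Chars.find rest sep).toNat + 1 + sep.length = ((PySem.Chars.find rest sep).toNat + sep.length) + 1 from by omega]
      simp [List.modifyHead]

def emOffs (d : List Char) : Nat → List Char → List Nat
  | 0, _ => []
  | fuel+1, s =>
    let j := PySem.Chars.find s d
    if j = -1 then []
    else j.toNat :: (emOffs d fuel (s.drop (j.toNat + d.length))).map (· + (j.toNat + d.length))

theorem em_emOffs_fuel (d : List Char) (hd : d ≠ []) :
    ∀ f1 f2 s, s.length < f1 → s.length < f2 → emOffs d f1 s = emOffs d f2 s := by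
  intro f1
  induction f1 with
  | zero => intro f2 s h1; omega
  | succ f1 ih =>
    intro f2 s h1 h2
    cases f2 with
    | zero => omega
    | succ f2 =>
      simp only [emOffs]
      by_cases hj : PySem.Chars.find s d = -1
      · simp [hj]
      · have hge := PySem.Chars.neg_one_le_find s d
        have hocc := em_find_occ d s (PySem.Chars.find s d) rfl (by omega)
        have hdl : 1 ≤ d.length := List.length_pos_of_ne_nil hd
        rw [if_neg hj, if_neg hj]
        congr 1
        rw [ih f2 _ (by simp [List.length_drop]; omega) (by simp [List.length_drop]; omega)]

theorem em_delim_ne_nil : emDelim ≠ [] := by decide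

theorem em_emOffs_succ (d : List Char) (fuel : Nat) (s : List Char) :
    emOffs d (fuel+1) s = if PySem.Chars.find s d = -1 then []
      else (PySem.Chars.find s d).toNat
        :: (emOffs d fuel (s.drop ((PySem.Chars.find s d).toNat + d.length))).map
             (· + ((PySem.Chars.find s d).toNat + d.length)) := rfl

theorem em_loop_eq (cs : List Char) :
    ∀ fuel k, k ≤ cs.length → cs.length - k < fuel →
      emOffsetsLoop cs fuel (PySem.Chars.findFrom cs emDelim (k : Int))
        = (emOffs emDelim (cs.length - k + 1) (cs.drop k)).map (fun o => ((k + o : Nat) : Int)) := by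
  intro fuel
  induction fuel with
  | zero => intro k hk h; omega
  | succ fuel ih =>
    intro k hk h
    rw [PySem.Chars.findFrom_natCast cs emDelim k hk]
    rw [em_emOffs_succ]
    by_cases hj : PySem.Chars.find (cs.drop k) emDelim = -1
    · rw [if_pos hj, if_pos hj]
      simp [emOffsetsLoop]
    · rw [if_neg hj, if_neg hj]
      have hge := PySem.Chars.neg_one_le_find (cs.drop k) emDelim
      have hocc := em_find_occ emDelim (cs.drop k) _ rfl (by omega)
      have hdl : 1 ≤ emDelim.length := List.length_pos_of_ne_nil em_delim_ne_nil
      set j := PySem.Chars.find (cs.drop k) emDelim with hjdef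
      have hki : ¬ ((k : Int) + j = -1) := by omega
      rw [emOffsetsLoop, if_neg hki]
      have hlendrop : (cs.drop k).length = cs.length - k := by simp
      have hk' : k + j.toNat + emDelim.length ≤ cs.length := by omega
      have harg : (k : Int) + j + (emDelim.length : Int) = ((k + j.toNat + emDelim.length : Nat) : Int) := by push_cast; omega
      rw [harg, ih (k + j.toNat + emDelim.length) hk' (by omega)]
      rw [List.drop_drop]
      have hdd : k + (j.toNat + emDelim.length) = k + j.toNat + emDelim.length := by omega
      rw [hdd]
      have hfuel : emOffs emDelim (cs.length - (k + j.toNat + emDelim.length) + 1) (cs.drop (k + j.toNat + emDelim.length))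
          = emOffs emDelim (cs.length - k) (cs.drop (k + j.toNat + emDelim.length)) := by
        apply em_emOffs_fuel emDelim em_delim_ne_nil <;> simp [List.length_drop] <;> omega
      rw [hfuel]
      simp only [List.map_cons, List.map_map]
      congr 1
      · push_cast; omega
      · apply List.map_congr_left
        intro o _
        simp only [Function.comp_apply]
        push_cast; omega

def emO (s : List Char) : List Nat := emOffs emDelim (s.length + 1) s

def emE (s : List Char) (i : Nat) : Nat := (emO s ++ [s.length]).getD i s.length

theorem em_O_none (s : List Char) (h : PySem.Chars.find s emDelim = -1) : emO s = [] := by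
  rw [emO, em_emOffs_succ, if_pos h]

theorem em_O_some (s : List Char) (j : Int) (h : PySem.Chars.find s emDelim = j) (hj : 0 ≤ j) :
    emO s = j.toNat :: (emO (s.drop (j.toNat + emDelim.length))).map (· + (j.toNat + emDelim.length)) := by
  have hocc := em_find_occ emDelim s j h hj
  have hdl : 1 ≤ emDelim.length := List.length_pos_of_ne_nil em_delim_ne_nil
  rw [emO, em_emOffs_succ, h, if_neg (by omega)]
  congr 2
  apply em_emOffs_fuel emDelim em_delim_ne_nil <;> simp [List.length_drop] <;> omega

theorem em_split_len : ∀ (n : Nat) (s : List Char), s.length ≤ n →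
    (PySem.Chars.splitOn s emDelim).length = (emO s).length + 1 := by
  intro n
  induction n with
  | zero =>
    intro s hs
    have : s = [] := List.eq_nil_of_length_eq_zero (by omega)
    subst this
    rw [em_O_none [] (by decide)]
    rfl
  | succ n ih =>
    intro s hs
    have hdl : 1 ≤ emDelim.length := List.length_pos_of_ne_nil em_delim_ne_nil
    by_cases hj : PySem.Chars.find s emDelim = -1
    · rw [em_splitOn_none emDelim em_delim_ne_nil s hj, em_O_none s hj]
      rfl
    · have hge := PySem.Chars.neg_one_le_find s emDelim
      have hocc := em_find_occ emDelim s _ rfl (by omega)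
      rw [em_splitOn_some emDelim em_delim_ne_nil s _ rfl (by omega),
          em_O_some s _ rfl (by omega)]
      simp only [List.length_cons, List.length_map]
      rw [ih _ (by simp [List.length_drop]; omega)]

theorem em_bounds : ∀ (n : Nat) (s : List Char), s.length ≤ n →
    ∀ o ∈ emO s, o + emDelim.length ≤ s.length := by
  intro n
  induction n with
  | zero =>
    intro s hs
    have : s = [] := List.eq_nil_of_length_eq_zero (by omega)
    subst this
    rw [em_O_none [] (by decide)]
    simp
  | succ n ih =>
    intro s hs o ho
    have hdl : 1 ≤ emDelim.length := List.length_pos_of_ne_nil em_delim_ne_nil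
    by_cases hj : PySem.Chars.find s emDelim = -1
    · rw [em_O_none s hj] at ho; simp at ho
    · have hge := PySem.Chars.neg_one_le_find s emDelim
      have hocc := em_find_occ emDelim s _ rfl (by omega)
      rw [em_O_some s _ rfl (by omega)] at ho
      rcases List.mem_cons.mp ho with h | h
      · omega
      · rcases List.mem_map.mp h with ⟨o', ho', rfl⟩
        have := ih _ (by simp [List.length_drop]; omega) o' ho'
        simp [List.length_drop] at this
        omega

theorem em_chain : ∀ (n : Nat) (s : List Char), s.length ≤ n →
    List.IsChain (· < ·) (emO s ++ [s.length]) := by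
  intro n
  induction n with
  | zero =>
    intro s hs
    have : s = [] := List.eq_nil_of_length_eq_zero (by omega)
    subst this
    rw [em_O_none [] (by decide)]
    simp
  | succ n ih =>
    intro s hs
    have hdl : 1 ≤ emDelim.length := List.length_pos_of_ne_nil em_delim_ne_nil
    by_cases hj : PySem.Chars.find s emDelim = -1
    · rw [em_O_none s hj]; simp
    · have hge := PySem.Chars.neg_one_le_find s emDelim
      have hocc := em_find_occ emDelim s _ rfl (by omega)
      set j := PySem.Chars.find s emDelim with hjdef
      set c := j.toNat + emDelim.length with hcdef
      have hslen : s.length = c + (s.drop c).length := by simp [List.length_drop]; omega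
      rw [em_O_some s _ rfl (by omega)]
      have hrw : (j.toNat :: (emO (s.drop c)).map (· + c)) ++ [s.length]
          = j.toNat :: ((emO (s.drop c) ++ [(s.drop c).length]).map (· + c)) := by
        simp [List.map_append]
        omega
      rw [hrw]
      rw [List.isChain_cons']
      constructor
      · intro b hb
        rw [List.head?_map] at hb
        rcases hx : (emO (s.drop c) ++ [(s.drop c).length]).head? with _ | y
        · rw [hx] at hb; simp at hb
        · rw [hx] at hb; simp at hb; omega
      · rw [List.isChain_map]
        have := ih (s.drop c) (by simp [List.length_drop]; omega)
        apply List.IsChain.imp _ this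
        intro a b hab
        omega

theorem em_E_le (s : List Char) (i : Nat) : emE s i ≤ s.length := by
  rw [emE, List.getD_eq_getElem?_getD]
  rcases hx : (emO s ++ [s.length])[i]? with _ | x
  · simp
  · simp only [Option.getD_some]
    have hm : x ∈ emO s ++ [s.length] := List.mem_of_getElem? hx
    rcases List.mem_append.mp hm with h | h
    · have := em_bounds s.length s le_rfl x h
      omega
    · simp at h; omega

theorem em_E_mono (s : List Char) {i j : Nat} (h : i ≤ j) : emE s i ≤ emE s j := by
  rcases Nat.eq_or_lt_of_le h with rfl | hlt
  · exact le_rfl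
  by_cases hj : j < (emO s ++ [s.length]).length
  · have hp : (emO s ++ [s.length]).Pairwise (· < ·) :=
      List.isChain_iff_pairwise.mp (em_chain s.length s le_rfl)
    have := (List.pairwise_iff_getElem.mp hp) i j (by omega) hj hlt
    rw [emE, emE, List.getD_eq_getElem _ _ (by omega), List.getD_eq_getElem _ _ hj]
    omega
  · have hE : emE s j = s.length := by
      rw [emE, List.getD_eq_getElem?_getD, List.getElem?_eq_none (by omega)]
      rfl
    rw [hE]
    exact em_E_le s i

theorem em_E_zero (s : List Char) (j : Int) (h : PySem.Chars.find s emDelim = j) (hj : 0 ≤ j) :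
    emE s 0 = j.toNat := by
  rw [emE, em_O_some s j h hj]
  rfl

theorem em_E_succ (s : List Char) (j : Int) (h : PySem.Chars.find s emDelim = j) (hj : 0 ≤ j)
    (i : Nat) (hi : i ≤ (emO (s.drop (j.toNat + emDelim.length))).length) :
    emE s (i+1) = (j.toNat + emDelim.length) + emE (s.drop (j.toNat + emDelim.length)) i := by
  have hocc := em_find_occ emDelim s j h hj
  set c := j.toNat + emDelim.length with hcdef
  have hslen : s.length = c + (s.drop c).length := by simp; omega
  rw [emE, em_O_some s j h hj]
  have hrw : (j.toNat :: (emO (s.drop c)).map (· + c)) ++ [s.length]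
      = j.toNat :: ((emO (s.drop c) ++ [(s.drop c).length]).map (· + c)) := by
    simp [List.map_append]
    omega
  rw [hrw]
  have hlt : i < (emO (s.drop c) ++ [(s.drop c).length]).length := by simp; omega
  rw [show (j.toNat :: ((emO (s.drop c) ++ [(s.drop c).length]).map (· + c))).getD (i+1) s.length
      = ((emO (s.drop c) ++ [(s.drop c).length]).map (· + c)).getD i s.length from rfl]
  rw [List.getD_eq_getElem?_getD, List.getElem?_map, List.getElem?_eq_getElem hlt]
  simp only [Option.map_some, Option.getD_some]
  rw [emE, List.getD_eq_getElem _ _ hlt]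
  omega

theorem em_first (s : List Char) :
    PySem.Chars.splitOn s emDelim = s.take (emE s 0) :: (PySem.Chars.splitOn s emDelim).drop 1 := by
  by_cases hj : PySem.Chars.find s emDelim = -1
  · rw [em_splitOn_none emDelim em_delim_ne_nil s hj]
    rw [emE, em_O_none s hj]
    simp
  · have hge := PySem.Chars.neg_one_le_find s emDelim
    rw [em_splitOn_some emDelim em_delim_ne_nil s _ rfl (by omega)]
    rw [em_E_zero s _ rfl (by omega)]
    simp

theorem em_suffix : ∀ (n : Nat) (s : List Char), s.length ≤ n → ∀ i, i ≤ (emO s).length →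
    (((PySem.Chars.splitOn s emDelim).drop (i+1)).map (fun m => emDelim ++ m)).flatten
      = s.drop (emE s i) := by
  intro n
  induction n with
  | zero =>
    intro s hs i hi
    have hnil : s = [] := List.eq_nil_of_length_eq_zero (by omega)
    subst hnil
    rw [em_O_none [] (by decide)] at hi
    simp at hi
    subst hi
    rw [em_splitOn_none emDelim em_delim_ne_nil [] (by decide)]
    rfl
  | succ n ih =>
    intro s hs i hi
    have hdl : 1 ≤ emDelim.length := List.length_pos_of_ne_nil em_delim_ne_nil
    by_cases hjn : PySem.Chars.find s emDelim = -1
    · rw [em_O_none s hjn] at hi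
      simp at hi
      subst hi
      rw [em_splitOn_none emDelim em_delim_ne_nil s hjn]
      rw [emE, em_O_none s hjn]
      simp
    · have hge := PySem.Chars.neg_one_le_find s emDelim
      have hocc := em_find_occ emDelim s _ rfl (by omega)
      set j := PySem.Chars.find s emDelim with hjdef
      set c := j.toNat + emDelim.length with hcdef
      have hslen : (s.drop c).length = s.length - c := by simp
      have hdropstep : emDelim ++ s.drop c = s.drop j.toNat := by
        rcases hocc.1 with ⟨t, ht⟩
        have htt : t = s.drop c := by
          have hdt : List.drop emDelim.length (emDelim ++ t) = t := by simp
          rw [ht, List.drop_drop] at hdt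
          rw [← hdt]
        rw [← htt, ht]
      rw [em_splitOn_some emDelim em_delim_ne_nil s _ rfl (by omega)]
      rw [em_O_some s _ rfl (by omega)] at hi
      cases i with
      | zero =>
        rw [em_E_zero s j rfl (by omega)]
        rw [show (0:Nat)+1 = 1 from rfl, List.drop_one, List.tail_cons]
        conv_lhs => rw [em_first (s.drop c)]
        rw [List.map_cons, List.flatten_cons]
        have hih := ih (s.drop c) (by omega) 0 (by simp)
        rw [show (0:Nat)+1 = 1 from rfl] at hih
        rw [hih]
        rw [← hdropstep]
        simp
      | succ i =>
        simp only [List.drop_succ_cons]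
        have hih := ih (s.drop c) (by omega) i (by simp at hi; omega)
        rw [hih]
        rw [em_E_succ s j rfl (by omega) i (by simp at hi; omega)]
        rw [← hcdef, List.drop_drop]

theorem em_E_lt (s : List Char) (i : Nat) (h : i < (emO s).length) : emE s i = (emO s)[i] := by
  rw [emE, List.getD_eq_getElem _ _ (by simp; omega)]
  rw [List.getElem_append_left h]

theorem em_E_ge (s : List Char) (i : Nat) (h : (emO s).length ≤ i) : emE s i = s.length := by
  rcases Nat.eq_or_lt_of_le h with rfl | hlt
  · rw [emE, List.getD_eq_getElem _ _ (by simp)]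
    simp
  · rw [emE, List.getD_eq_getElem?_getD, List.getElem?_eq_none (by simp; omega)]
    rfl

theorem em_chunk (s : List Char) (a b : Nat) (ha : 1 ≤ a) (hab : a ≤ b)
    (hb : b ≤ (emO s).length + 1) :
    ((((PySem.Chars.splitOn s emDelim).drop a).take (b - a)).map (fun m => emDelim ++ m)).flatten
      = (s.drop (emE s (a-1))).take (emE s (b-1) - emE s (a-1)) := by
  set f : List Char → List Char := fun m => emDelim ++ m with hf
  set ps := PySem.Chars.splitOn s emDelim with hps
  have hsuf1 : ((ps.drop a).map f).flatten = s.drop (emE s (a-1)) := by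
    have := em_suffix s.length s le_rfl (a-1) (by omega)
    rw [show a - 1 + 1 = a from by omega] at this
    exact this
  have hsuf2 : ((ps.drop b).map f).flatten = s.drop (emE s (b-1)) := by
    have := em_suffix s.length s le_rfl (b-1) (by omega)
    rw [show b - 1 + 1 = b from by omega] at this
    exact this
  have hsplit : ((ps.drop a).take (b-a)).map f ++ (ps.drop b).map f = (ps.drop a).map f := by
    rw [← List.map_append]
    congr 1
    rw [show ps.drop b = (ps.drop a).drop (b-a) from by rw [List.drop_drop]; congr 1; omega]
    exact List.take_append_drop _ _
  have happ : (((ps.drop a).take (b-a)).map f).flatten ++ s.drop (emE s (b-1)) = s.drop (emE s (a-1)) := by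
    rw [← hsuf2, ← hsuf1, ← List.flatten_append, hsplit]
  have hm : emE s (a-1) ≤ emE s (b-1) := em_E_mono s (by omega)
  have hle : emE s (b-1) ≤ s.length := em_E_le s (b-1)
  set Y := (((ps.drop a).take (b-a)).map f).flatten with hY
  have hYlen : Y.length = emE s (b-1) - emE s (a-1) := by
    have := congrArg List.length happ
    simp [List.length_drop] at this
    omega
  calc Y = (Y ++ s.drop (emE s (b-1))).take Y.length := by rw [List.take_left]
    _ = (s.drop (emE s (a-1))).take (emE s (b-1) - emE s (a-1)) := by rw [happ, hYlen]

theorem em_slice_eq {α : Type} (xs : List α) (a b : Int) :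
    PySem.List.slice xs (some a) (some b)
      = (xs.drop (PySem.List.clampIdx xs.length a)).take
          (PySem.List.clampIdx xs.length b - PySem.List.clampIdx xs.length a) := rfl

theorem em_clamp_nonneg (n : Nat) (i : Int) (h : 0 ≤ i) :
    PySem.List.clampIdx n i = min i.toNat n := by
  simp [PySem.List.clampIdx]
  omega

-- ===== VERDICT (by name: the statement is the Claim_ definition above) =====
theorem extract_molecules_spec : Claim_unchanged_extract_molecules := by
  unfold Claim_unchanged_extract_molecules Spec_extract_molecules
  intro content start end_ _dom hnd
  rw [extract_molecules, extract_molecules_alt]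
  set cs := content.toList with hcs
  have hofs : emOffsetsLoop cs (cs.length + 1) (PySem.Chars.find cs emDelim)
      = (emO cs).map (fun (o : Nat) => (o : Int)) := by
    have h0 := em_loop_eq cs (cs.length + 1) 0 (by omega) (by omega)
    simp only [Nat.cast_zero, PySem.Chars.findFrom_zero, List.drop_zero, Nat.sub_zero, Nat.zero_add] at h0
    exact h0
  rw [hofs]
  simp only [List.length_map]
  set K := (emO cs).length with hK
  have hlen : (PySem.Chars.splitOn cs emDelim).length = K + 1 := em_split_len cs.length cs le_rfl
  rw [hlen]
  rw [show ((K + 1 : Nat) : Int) - 1 = (K : Int) from by push_cast; omega]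
  rw [D_extract_molecules, hlen] at hnd
  have hnd2 : ¬(end_ ≤ -2 ∧ max start 1 < (K : Int) + end_ + 2) := by
    push_cast at hnd; omega
  set s1 := (if start < 1 then 1 else start) with hs1
  have hs1ge : 1 ≤ s1 := by rw [hs1]; split_ifs <;> omega
  have hmax : max start 1 = s1 := by rw [hs1]; split_ifs <;> omega
  rw [hmax]
  set e1 := (if end_ > (K : Int) then (K : Int) else end_) with he1
  have he1le : e1 ≤ K := by rw [he1]; split_ifs <;> omega
  set eB := min end_ (K : Int) with heB
  have heBle : eB ≤ K := by rw [heB]; omega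
  by_cases hB : s1 > eB
  · -- B returns ""; show the A-side slice is empty
    rw [if_pos hB]
    rw [em_slice_eq, hlen]
    have hca : PySem.List.clampIdx (K+1) s1 = min s1.toNat (K+1) := em_clamp_nonneg _ _ (by omega)
    have hnd' : ¬(end_ ≤ -2 ∧ s1 < (K : Int) + end_ + 2) := by rwa [hmax] at hnd2
    have hcb : PySem.List.clampIdx (K+1) (e1+1) ≤ min s1.toNat (K+1) := by
      simp only [PySem.List.clampIdx]
      rw [heB] at hB
      rw [he1]
      split_ifs at hB ⊢ <;> omega
    rw [hca]
    rw [show PySem.List.clampIdx (K+1) (e1+1) - min s1.toNat (K+1) = 0 from by omega]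
    rw [List.take_zero, List.map_nil, PySem.Chars.join_nil]
  · rw [if_neg hB]
    push_neg at hB
    have hsK : s1 ≤ (K : Int) := le_trans hB heBle
    have he0 : 0 ≤ eB := le_trans (by omega) hB
    have hstop : e1 + 1 = eB + 1 := by
      rw [he1, heB]; split_ifs <;> omega
    rw [hstop]
    set a := s1.toNat with haDef
    set b := (eB + 1).toNat with hbDef
    have ha1 : 1 ≤ a := by omega
    have hab : a ≤ b := by omega
    have hbK : b ≤ K + 1 := by omega
    have haK : a ≤ K := by omega
    rw [em_slice_eq, hlen]
    have hca : PySem.List.clampIdx (K+1) s1 = a := by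
      rw [em_clamp_nonneg _ _ (by omega)]; omega
    have hcb : PySem.List.clampIdx (K+1) (eB+1) = b := by
      rw [em_clamp_nonneg _ _ (by omega)]; omega
    rw [hca, hcb]
    have hchunk := em_chunk cs a b ha1 hab (by omega)
    rw [em_join_nil_eq_flatten, hchunk]
    have hlo : (PySem.List.pyGet? ((emO cs).map (fun (o : Nat) => (o : Int))) (s1 - 1)).getD 0
        = ((emE cs (a-1) : Nat) : Int) := by
      rw [show s1 - 1 = (((a - 1 : Nat)) : Int) from by push_cast; omega]
      rw [PySem.List.pyGet?_natCast]
      rw [List.getElem?_map]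
      rw [List.getElem?_eq_getElem (by omega : a - 1 < (emO cs).length)]
      simp only [Option.map_some, Option.getD_some]
      rw [em_E_lt cs (a-1) (by omega)]
    rw [hlo]
    by_cases hbig : eB < (K : Int)
    · rw [if_pos hbig]
      have hhi : (PySem.List.pyGet? ((emO cs).map (fun (o : Nat) => (o : Int))) eB).getD 0
          = ((emE cs (b-1) : Nat) : Int) := by
        rw [show eB = (((b - 1 : Nat)) : Int) from by push_cast; omega]
        rw [PySem.List.pyGet?_natCast]
        rw [List.getElem?_map]
        rw [List.getElem?_eq_getElem (by omega : b - 1 < (emO cs).length)]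
        simp only [Option.map_some, Option.getD_some]
        rw [em_E_lt cs (b-1) (by omega)]
      rw [hhi]
      congr 1
      rw [PySem.Chars.slice_eq_listSlice, PySem.List.slice_natCast]
    · rw [if_neg hbig]
      have hb1 : b - 1 = K := by omega
      rw [show ((cs.length : Nat) : Int) = ((emE cs (b-1) : Nat) : Int) from by
        rw [hb1, em_E_ge cs K (by omega)]]
      congr 1
      rw [PySem.Chars.slice_eq_listSlice, PySem.List.slice_natCast]

theorem extract_molecules_changed : Claim_changed_extract_molecules := by
  unfold Claim_changed_extract_molecules
  refine ⟨by decide, by decide, by decide, by decide, by decide⟩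

theorem extract_molecules_tight : Claim_exact_extract_molecules := by
  unfold Claim_exact_extract_molecules
  intro content start end_ _dom hd
  obtain ⟨hend, hwrap⟩ := hd
  rw [extract_molecules, extract_molecules_alt]
  set cs := content.toList with hcs
  have hofs : emOffsetsLoop cs (cs.length + 1) (PySem.Chars.find cs emDelim)
      = (emO cs).map (fun (o : Nat) => (o : Int)) := by
    have h0 := em_loop_eq cs (cs.length + 1) 0 (by omega) (by omega)
    simp only [Nat.cast_zero, PySem.Chars.findFrom_zero, List.drop_zero, Nat.sub_zero, Nat.zero_add] at h0
    exact h0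
  rw [hofs]
  simp only [List.length_map]
  set K := (emO cs).length with hK
  have hlen0 : (PySem.Chars.splitOn cs emDelim).length = K + 1 := em_split_len cs.length cs le_rfl
  rw [hlen0] at hwrap
  have hwrap2 : max start 1 < (K : Int) + end_ + 2 := by push_cast at hwrap; omega
  set s1 := (if start < 1 then 1 else start) with hs1
  have hs1ge : 1 ≤ s1 := by rw [hs1]; split_ifs <;> omega
  have hmax : max start 1 = s1 := by rw [hs1]; split_ifs <;> omega
  rw [hmax] at hwrap2 ⊢
  -- facts from D_
  have hKpos : 1 ≤ (K : Int) := by omega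
  have hs1K : s1 < (K : Int) + end_ + 2 := hwrap2
  -- B's branch: min end_ K = end_ < s1, so B returns ""
  have hminB : min end_ (K : Int) = end_ := by omega
  rw [hminB, if_pos (by omega : s1 > end_)]
  -- A's side: end1 = end_ (since end_ ≤ -2 < K), stop = end_ + 1 < 0 wraps
  have hlen : (PySem.Chars.splitOn cs emDelim).length = K + 1 := em_split_len cs.length cs le_rfl
  rw [hlen]
  rw [show ((K + 1 : Nat) : Int) - 1 = (K : Int) from by push_cast; omega]
  rw [if_neg (by omega : ¬ end_ > (K : Int))]
  -- the selected slice is nonempty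
  set a := PySem.List.clampIdx (K+1) s1 with haDef
  set b := PySem.List.clampIdx (K+1) (end_+1) with hbDef
  have hca : a = s1.toNat := by
    rw [haDef, em_clamp_nonneg _ _ (by omega)]; omega
  have hcb : b = ((K : Int) + end_ + 2).toNat := by
    rw [hbDef]
    simp only [PySem.List.clampIdx]
    split_ifs <;> omega
  have hslice : (PySem.List.slice (PySem.Chars.splitOn cs emDelim) (some s1) (some (end_+1))).length
      = b - a := by
    rw [PySem.List.length_slice, hlen]
  have hlenpos : 0 < b - a := by omega
  set sel := PySem.List.slice (PySem.Chars.splitOn cs emDelim) (some s1) (some (end_+1)) with hsel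
  intro hEq
  cases hsel2 : sel with
  | nil => rw [hsel2] at hslice; simp at hslice; omega
  | cons p ps =>
    rw [hsel2] at hEq
    rw [List.map_cons, em_join_nil_eq_flatten, List.flatten_cons] at hEq
    have : ((emDelim ++ p) ++ (ps.map (fun mol => emDelim ++ mol)).flatten) = ("" : String).toList := by
      rw [← hEq]
      simp
    simp [emDelim] at this
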